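-- pv_equiv track=rewrite | github.com/catonlyprep/GenIce | genice/formats/_ring.py | isomorphs
-- ===== SOURCE A (Python) =====
-- def isomorphs(a):
--     """
--     return the symmetry number of cycle a
--     """
--     iso = set()
--     aa = a + a
--     for i in range(len(a)):
--         part = tuple(aa[i:i+len(a)])
--         iso.add(part)
--     e = [not x for x in a]
--     ee = e + e
--     for i in range(len(a)):
--         part = tuple(ee[i:i+len(a)])
--         iso.add(part)
--     return iso
-- ===== SOURCE B (Python) =====
-- def isomorphs(a):
--     """
--     return the symmetry number of cycle a
--     """
--     # Enumerate rotations incrementally: each is obtained from the previous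
--     # by a single left rotation (no doubled array, no sliding windows);
--     # complementary cycles are the elementwise negations of those rotations.
--     rotations = []
--     r = list(a)
--     for _ in range(len(a)):
--         rotations.append(tuple(r))
--         r = r[1:] + r[:1]
--     iso = set()
--     iso.update(rotations)
--     iso.update(tuple(not x for x in t) for t in rotations)
--     return iso
-- ===== Notes on version B (the rewrite author's own statement) =====
-- stated objective: alternative
-- what changed: B enumerates the rotations incrementally (each obtained from the previous one by a single left rotation, no doubled arrays and no sliding windows) and gets the complementary cycles by elementwise negation of those rotations instead of A's second sliding-window pass over a doubled complement list.
import Mathlib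
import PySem

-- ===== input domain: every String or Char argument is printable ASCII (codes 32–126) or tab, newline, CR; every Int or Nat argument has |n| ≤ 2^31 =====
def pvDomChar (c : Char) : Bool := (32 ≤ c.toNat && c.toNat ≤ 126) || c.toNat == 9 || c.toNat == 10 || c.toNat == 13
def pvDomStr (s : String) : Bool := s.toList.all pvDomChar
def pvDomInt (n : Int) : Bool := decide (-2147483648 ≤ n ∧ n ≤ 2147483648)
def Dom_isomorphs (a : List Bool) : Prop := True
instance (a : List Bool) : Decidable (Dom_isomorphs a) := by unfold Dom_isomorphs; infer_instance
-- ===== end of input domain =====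

-- B enumerates rotations incrementally (each from the previous by one left rotation, no doubled
-- arrays or sliding windows) and gets complements by negating those rotations (objective: alternative).


-- ===== PORT A =====
def isomorphs (a : List Bool) : List (List Bool) :=
  let n : Int := a.length
  let aa := a ++ a
  let iso := (PySem.List.pyRange 0 n 1).foldl
      (fun s i => PySem.Set.add s (PySem.List.slice aa (some i) (some (i + n))))
      PySem.Set.empty
  let e := a.map (fun x => !x)
  let ee := e ++ e
  (PySem.List.pyRange 0 n 1).foldl
      (fun s i => PySem.Set.add s (PySem.List.slice ee (some i) (some (i + n)))) iso

-- ===== PORT B =====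
-- r[1:] + r[:1] : one left rotation
def rotOne (r : List Bool) : List Bool :=
  PySem.List.slice r (some 1) none ++ PySem.List.slice r none (some 1)

def isomorphs_alt (a : List Bool) : List (List Bool) :=
  let st := (PySem.List.pyRange 0 (a.length : Int) 1).foldl
      (fun (st : List (List Bool) × List Bool) _ => (st.1 ++ [st.2], rotOne st.2))
      ([], a)
  let rotations := st.1
  let iso := rotations.foldl PySem.Set.add PySem.Set.empty
  rotations.foldl (fun s t => PySem.Set.add s (t.map (fun x => !x))) iso

-- ===== PRECONDITION & SPEC =====
def Spec_isomorphs (a : List Bool) (out : List (List Bool)) : Prop := out = isomorphs_alt a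
instance (a : List Bool) (out : List (List Bool)) : Decidable (Spec_isomorphs a out) := by unfold Spec_isomorphs; infer_instance

-- ===== CLAIM (what is proved, stated in full; the proofs are below) =====
def Claim_equal_isomorphs : Prop := ∀ (a : List Bool), Dom_isomorphs a → Spec_isomorphs a (isomorphs a)

-- ===== LEMMAS AND PROOFS =====

-- one left rotation is tail ++ take 1
theorem rotOne_eq (r : List Bool) : rotOne r = r.tail ++ r.take 1 := by
  rw [rotOne, PySem.List.slice_from_one]
  congr 1
  rw [show (some (1:Int)) = some ((1:Nat):Int) from rfl, PySem.List.slice_to_natCast]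

-- B's accumulation loop ignores the loop variable, so only the length of the index list
-- matters: it collects the successive iterates of rotOne
theorem fold_rots (L : List Int) : ∀ (acc : List (List Bool)) (r : List Bool),
    L.foldl (fun (st : List (List Bool) × List Bool) _ => (st.1 ++ [st.2], rotOne st.2)) (acc, r)
      = (acc ++ (List.range L.length).map (fun j => rotOne^[j] r), rotOne^[L.length] r) := by
  induction L with
  | nil => intro acc r; simp
  | cons x L ih =>
    intro acc r
    rw [List.foldl_cons, ih (acc ++ [r]) (rotOne r)]
    simp [List.range_succ_eq_map, List.map_map, Function.comp_def, Function.iterate_succ_apply]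

-- the k-th iterate of the single rotation is the rotation by k
theorem iterate_rotOne (a : List Bool) : ∀ (k : Nat), k ≤ a.length →
    rotOne^[k] a = a.drop k ++ a.take k := by
  intro k
  induction k with
  | zero => intro _; simp
  | succ k ih =>
    intro hk
    have hk' : k < a.length := by omega
    rw [Function.iterate_succ_apply', ih (by omega), rotOne_eq,
        List.drop_eq_getElem_cons hk']
    have h1 : ((a[k] :: a.drop (k + 1)) ++ a.take k).tail = a.drop (k + 1) ++ a.take k := rfl
    have h2 : ((a[k] :: a.drop (k + 1)) ++ a.take k).take 1 = [a[k]] := rfl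
    rw [h1, h2, List.append_assoc, List.take_add_one, List.getElem?_eq_getElem hk']
    rfl

-- a window of the doubled list is the rotation by its offset
theorem slice_doubled (a : List Bool) (k : Nat) (hk : k ≤ a.length) :
    PySem.List.slice (a ++ a) (some (k : Int)) (some ((k : Int) + (a.length : Int)))
      = a.drop k ++ a.take k := by
  rw [PySem.List.slice_natCast_add]
  rw [List.drop_append_of_le_length hk, List.take_append, List.take_of_length_le (by simp),
      List.length_drop]
  have : a.length - (a.length - k) = k := by omega
  rw [this]

-- slicing commutes with map (slice is clamped drop/take; clamping reads only the length)
theorem slice_map (xs : List Bool) (f : Bool → Bool) (b c : Option Int) :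
    PySem.List.slice (xs.map f) b c = (PySem.List.slice xs b c).map f := by
  simp [PySem.List.slice, PySem.List.clampIdx]

-- ===== VERDICT (by name: the statement is the Claim_ definition above) =====
theorem isomorphs_spec : Claim_equal_isomorphs := by
  intro a _
  show isomorphs a = isomorphs_alt a
  have hee : (a.map fun x => !x) ++ (a.map fun x => !x) = (a ++ a).map (fun x => !x) := by simp
  have hlen : (((a.length : Int)) - 0).toNat = a.length := by omega
  -- B's rotation list is exactly A's list of windows of the doubled list
  have hr : ((PySem.List.pyRange 0 (a.length : Int) 1).foldl
      (fun (st : List (List Bool) × List Bool) _ => (st.1 ++ [st.2], rotOne st.2)) ([], a)).1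
      = (PySem.List.pyRange 0 (a.length : Int) 1).map
          (fun i => PySem.List.slice (a ++ a) (some i) (some (i + (a.length : Int)))) := by
    rw [fold_rots, PySem.List.length_pyRange_one, hlen, PySem.List.pyRange_one, hlen,
        List.map_map, List.nil_append]
    apply List.map_congr_left
    intro j hj
    rw [List.mem_range] at hj
    simp only [Function.comp_def, zero_add]
    rw [iterate_rotOne a j (by omega), slice_doubled a j (by omega)]
  simp only [isomorphs, isomorphs_alt, hee, slice_map, hr, List.foldl_map]
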